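-- pv_equiv track=rewrite | github.com/sandeepgupta2k4/aoc-2021 | 17A.py | hits
-- ===== SOURCE A (Python) =====
-- def step(x, y, pos_x, pos_y):
--     pos_x += x
--     pos_y += y
--     if x > 0:
--         x -= 1
--     elif x < 0:
--         x += 1
--
--     y -= 1
--     return pos_x, pos_y, x, y
--
-- def in_target(x, y):
--     target_min_x = 257
--     target_max_x = 286
--     target_min_y = -101
--     target_max_y = -57
--     return x >= target_min_x and x <= target_max_x and y >= target_min_y and y <= target_max_y
--
-- def missed(x, y):
--     target_max_x = 286
--     target_min_y = -101
--     return y < target_min_y or x > target_max_x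
--
-- def hits(x, y):
--     max_y = 0
--     pos_x = 0
--     pos_y = 0
--     while not in_target(pos_x, pos_y):
--         if missed(pos_x, pos_y):
--             return False, 0
--         pos_x, pos_y, x, y = step(x, y, pos_x, pos_y)
--         if pos_y > max_y:
--             max_y = pos_y
--     return True, max_y
-- ===== SOURCE B (Python) =====
-- def _isqrt(n):
--     # floor square root by bit-doubling recursion
--     if n < 4:
--         return 0 if n < 1 else 1
--     r = 2 * _isqrt(n // 4)
--     return r + 1 if (r + 1) * (r + 1) <= n else r
--
--
-- def _isqrt_ceil(n):
--     s = _isqrt(n)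
--     return s + 1 if s * s < n else s
--
--
-- def hits(x, y):
--     # Closed form, no step-by-step simulation.
--     # pos_y(t) = y*t - t*(t-1)/2; pos_x(t) = x*t - t*(t-1)/2 clamped at the plateau x*(x+1)/2.
--     # The probe is in the target iff t lies in [t1,t2] (y window) and [u1,u2] (x window).
--     if x < 23:
--         # plateau x*(x+1)//2 <= 253 < 257: the probe can never reach the target's x range
--         return False, 0
--     b = 2 * y + 1
--     t1 = (b + _isqrt_ceil(b * b + 456) + 1) // 2       # first t with pos_y <= -57
--     t2 = (b + _isqrt(b * b + 808)) // 2                # last t with pos_y >= -101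
--     c = 2 * x + 1
--     u1 = (c - _isqrt(c * c - 2056) + 1) // 2           # first t with pos_x >= 257
--     lo = max(t1, u1)
--     # for x == 23 the plateau is 276 <= 286, so pos_x never overshoots
--     hi = t2 if x == 23 else min(t2, (c - _isqrt_ceil(c * c - 2288)) // 2)
--     if lo <= hi:
--         return True, (y * (y + 1) // 2 if y > 0 else 0)
--     return False, 0
-- ===== Notes on version B (the rewrite author's own statement) =====
-- stated objective: faster
-- what changed: B replaces A's step-by-step trajectory simulation by a closed form: it solves the quadratics pos_y(t)=y*t-t*(t-1)/2 and the clamped pos_x(t) with integer square roots to get the time windows in which each coordinate is inside the target, returns hit iff the windows intersect, and computes the max height directly as y*(y+1)//2 (0 if y<=0).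
import Mathlib
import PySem

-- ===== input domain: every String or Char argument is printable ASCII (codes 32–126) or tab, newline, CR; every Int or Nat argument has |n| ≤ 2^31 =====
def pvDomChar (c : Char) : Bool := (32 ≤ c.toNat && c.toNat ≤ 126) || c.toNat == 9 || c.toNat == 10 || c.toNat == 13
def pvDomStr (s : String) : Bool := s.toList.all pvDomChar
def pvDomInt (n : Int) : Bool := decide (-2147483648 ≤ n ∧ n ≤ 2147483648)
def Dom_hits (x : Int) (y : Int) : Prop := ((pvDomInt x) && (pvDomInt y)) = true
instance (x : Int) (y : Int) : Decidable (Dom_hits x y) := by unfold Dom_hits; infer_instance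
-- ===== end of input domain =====

-- B replaces A's step-by-step simulation by a closed form (integer-sqrt time windows and y*(y+1)//2);
-- the ports agree on every input (A is total; its while loop is ported with a fuel proved sufficient below).

-- ===== PORT A =====
def stepA (x y posx posy : Int) : Int × Int × Int × Int :=
  let posx := posx + x
  let posy := posy + y
  let x := if x > 0 then x - 1 else if x < 0 then x + 1 else x
  let y := y - 1
  (posx, posy, x, y)

def inTargetA (px py : Int) : Bool := 257 ≤ px && px ≤ 286 && -101 ≤ py && py ≤ -57

def missedA (px py : Int) : Bool := py < -101 || px > 286

-- A's while loop; the fuel 2*y⁺+200 never runs out (the loop provably exits by step 2*y⁺+103, see py_late)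
def loopA : Nat → Int → Int → Int → Int → Int → Bool × Int
  | 0, _, _, _, _, _ => (false, 0)
  | fuel+1, x, y, posx, posy, maxy =>
    if inTargetA posx posy then (true, maxy)
    else if missedA posx posy then (false, 0)
    else
      match stepA x y posx posy with
      | (px', py', x', y') => loopA fuel x' y' px' py' (if py' > maxy then py' else maxy)

def hits (x : Int) (y : Int) : Bool × Int := loopA (2 * y.toNat + 200) x y 0 0 0

-- ===== PORT B =====
def isqrtB (n : Int) : Int :=
  if n < 4 then (if n < 1 then 0 else 1)
  else
    let r := 2 * isqrtB (PySem.Int.floordiv n 4)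
    if (r + 1) * (r + 1) ≤ n then r + 1 else r
termination_by n.toNat
decreasing_by
  rw [PySem.Int.floordiv_eq_ediv_of_pos (by norm_num)]
  omega

def isqrtCeilB (n : Int) : Int :=
  let s := isqrtB n
  if s * s < n then s + 1 else s

def hits_alt (x : Int) (y : Int) : Bool × Int :=
  if x < 23 then (false, 0)
  else
    let b := 2 * y + 1
    let t1 := PySem.Int.floordiv (b + isqrtCeilB (b * b + 456) + 1) 2
    let t2 := PySem.Int.floordiv (b + isqrtB (b * b + 808)) 2
    let c := 2 * x + 1
    let u1 := PySem.Int.floordiv (c - isqrtB (c * c - 2056) + 1) 2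
    let lo := max t1 u1
    let hi := if x = 23 then t2 else min t2 (PySem.Int.floordiv (c - isqrtCeilB (c * c - 2288)) 2)
    if lo ≤ hi then (true, if y > 0 then PySem.Int.floordiv (y * (y + 1)) 2 else 0)
    else (false, 0)

-- ===== PRECONDITION & SPEC =====
def Spec_hits (x : Int) (y : Int) (out : Bool × Int) : Prop := out = hits_alt x y
instance (x : Int) (y : Int) (out : Bool × Int) : Decidable (Spec_hits x y out) := by unfold Spec_hits; infer_instance

-- ===== CLAIM (what is proved, stated in full; the proofs are below) =====
def Claim_equal_hits : Prop := ∀ (x : Int) (y : Int), Dom_hits x y → Spec_hits x y (hits x y)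

-- ===== LEMMAS AND PROOFS =====

-- closed-form trajectory: velocity, positions and running max after t steps
def vxF (x : Int) (t : Nat) : Int := if 0 ≤ x then max (x - t) 0 else min (x + t) 0

def pxF (x : Int) : Nat → Int
  | 0 => 0
  | t+1 => pxF x t + vxF x t

def pyF (y : Int) : Nat → Int
  | 0 => 0
  | t+1 => pyF y t + (y - t)

def myF (y : Int) : Nat → Int
  | 0 => 0
  | t+1 => if pyF y (t+1) > myF y t then pyF y (t+1) else myF y t

def exitF (x y : Int) (t : Nat) : Bool := inTargetA (pxF x t) (pyF y t) || missedA (pxF x t) (pyF y t)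

lemma py_closed (y : Int) (t : Nat) : 2 * pyF y t = 2 * y * t - t * t + t := by
  induction t with
  | zero => simp [pyF]
  | succ t ih => simp only [pyF]; push_cast; push_cast at ih; ring_nf; ring_nf at ih; omega

lemma py_late (y : Int) : pyF y (2 * y.toNat + 103) < -101 := by
  have h := py_closed y (2 * y.toNat + 103)
  have hc : ((2 * y.toNat + 103 : Nat) : Int) = 2 * (y.toNat : Int) + 103 := by push_cast; ring
  rw [hc] at h
  rcases (by omega : y ≤ 0 ∨ 0 < y) with hy | hy
  · have h0 : (y.toNat : Int) = 0 := by omega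
    rw [h0] at h; nlinarith
  · have h0 : (y.toNat : Int) = y := by omega
    rw [h0] at h; nlinarith

lemma exit_late (x y : Int) : exitF x y (2 * y.toNat + 103) = true := by
  have := py_late y
  simp only [exitF, missedA, Bool.or_eq_true, decide_eq_true_eq]
  right; left; exact this

lemma exit_exists (x y : Int) : ∃ t, exitF x y t = true := ⟨_, exit_late x y⟩

def Nexit (x y : Int) : Nat := Nat.find (exit_exists x y)

lemma Nexit_le (x y : Int) : Nexit x y ≤ 2 * y.toNat + 103 :=
  Nat.find_min' (exit_exists x y) (exit_late x y)

lemma vx_step (x : Int) (t : Nat) :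
    (if vxF x t > 0 then vxF x t - 1 else if vxF x t < 0 then vxF x t + 1 else vxF x t) = vxF x (t+1) := by
  unfold vxF; push_cast; split_ifs <;> omega

lemma vx_zero (x : Int) : vxF x 0 = x := by
  unfold vxF; push_cast; split_ifs <;> omega

lemma loop_run (x y : Int) (N : Nat) (hN : exitF x y N = true) (hmin : ∀ s, s < N → exitF x y s = false) :
    ∀ fuel t, t ≤ N → N - t < fuel →
      loopA fuel (vxF x t) (y - t) (pxF x t) (pyF y t) (myF y t)
        = (if inTargetA (pxF x N) (pyF y N) then (true, myF y N) else (false, 0)) := by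
  intro fuel
  induction fuel with
  | zero => intro t _ h; omega
  | succ f ih =>
    intro t ht hf
    rcases Nat.eq_or_lt_of_le ht with rfl | hlt
    · have := hN
      unfold exitF at this
      rw [loopA]
      split_ifs with h1 h2
      · rfl
      · rfl
      · simp [h1, h2] at this
    · have hne := hmin t hlt
      unfold exitF at hne
      have h1 : inTargetA (pxF x t) (pyF y t) = false := by
        cases hh : inTargetA (pxF x t) (pyF y t) <;> simp [hh] at hne ⊢
      have h2 : missedA (pxF x t) (pyF y t) = false := by
        cases hh : missedA (pxF x t) (pyF y t) <;> simp [hh] at hne ⊢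
      rw [loopA, h1, h2]
      simp only [Bool.false_eq_true, if_false, stepA]
      have e1 : pxF x t + vxF x t = pxF x (t+1) := rfl
      have e2 : pyF y t + (y - t) = pyF y (t+1) := rfl
      have e3 : (y - t) - 1 = y - ((t+1 : Nat) : Int) := by push_cast; ring
      rw [e1, e2, e3, vx_step]
      have e4 : (if pyF y (t+1) > myF y t then pyF y (t+1) else myF y t) = myF y (t+1) := rfl
      rw [e4]
      exact ih (t+1) hlt (by omega)

lemma hits_eq (x y : Int) :
    hits x y = (if inTargetA (pxF x (Nexit x y)) (pyF y (Nexit x y)) then (true, myF y (Nexit x y)) else (false, 0)) := by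
  have hmin : ∀ s, s < Nexit x y → exitF x y s = false := by
    intro s hs
    have := Nat.find_min (exit_exists x y) hs
    simpa using this
  have h0 := loop_run x y (Nexit x y) (Nat.find_spec (exit_exists x y)) hmin
    (2 * y.toNat + 200) 0 (Nat.zero_le _) (by have := Nexit_le x y; omega)
  rw [vx_zero] at h0
  unfold hits
  simpa [pxF, pyF, myF] using h0

-- ====== the B side ======

lemma isqrtB_spec_aux : ∀ (k : Nat) (n : Int), n.toNat ≤ k →
    0 ≤ isqrtB n ∧ (0 ≤ n → isqrtB n * isqrtB n ≤ n ∧ n < (isqrtB n + 1) * (isqrtB n + 1)) := by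
  intro k
  induction k with
  | zero =>
    intro n hn
    rw [isqrtB, if_pos (by omega), if_pos (by omega)]
    omega
  | succ k ih =>
    intro n hn
    rw [isqrtB]
    have hfd : PySem.Int.floordiv n 4 = n / 4 := PySem.Int.floordiv_eq_ediv_of_pos (by norm_num)
    rw [hfd]
    dsimp only
    split_ifs with h1 h2 h2
    · omega
    · omega
    · obtain ⟨hpos, hsq⟩ := ih (n / 4) (by omega)
      obtain ⟨hlo, hhi⟩ := hsq (by omega)
      set s := isqrtB (n / 4) with hs
      refine ⟨by omega, fun _ => ⟨h2, ?_⟩⟩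
      nlinarith [Int.mul_ediv_add_emod n 4, Int.emod_lt_of_pos n (show (0:Int) < 4 by norm_num)]
    · obtain ⟨hpos, hsq⟩ := ih (n / 4) (by omega)
      obtain ⟨hlo, hhi⟩ := hsq (by omega)
      set s := isqrtB (n / 4) with hs
      refine ⟨by omega, fun _ => ⟨?_, by omega⟩⟩
      nlinarith [Int.mul_ediv_add_emod n 4, Int.emod_nonneg n (show (4:Int) ≠ 0 by norm_num)]

lemma isqrtB_spec (n : Int) (h : 0 ≤ n) :
    0 ≤ isqrtB n ∧ isqrtB n * isqrtB n ≤ n ∧ n < (isqrtB n + 1) * (isqrtB n + 1) := by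
  obtain ⟨h1, h2⟩ := isqrtB_spec_aux n.toNat n le_rfl
  exact ⟨h1, h2 h⟩

lemma isqrtCeilB_spec (n : Int) (h : 1 ≤ n) :
    0 ≤ isqrtCeilB n ∧ n ≤ isqrtCeilB n * isqrtCeilB n ∧ (isqrtCeilB n - 1) * (isqrtCeilB n - 1) < n := by
  obtain ⟨h0, hlo, hhi⟩ := isqrtB_spec n (by omega)
  unfold isqrtCeilB
  dsimp only
  split_ifs with hc
  · refine ⟨by omega, by omega, by simpa using hc⟩
  · have heq : isqrtB n * isqrtB n = n := by omega
    have h1 : 1 ≤ isqrtB n := by nlinarith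
    refine ⟨h0, by omega, by nlinarith⟩

lemma px_closed (x : Int) (hx : 0 ≤ x) (t : Nat) :
    2 * pxF x t = if (t : Int) ≤ x then 2 * x * t - t * t + t else x * x + x := by
  induction t with
  | zero => simp [pxF]; intro h; omega
  | succ t ih =>
    simp only [pxF]
    rcases (by omega : ((t+1 : Nat) : Int) ≤ x ∨ ¬ ((t+1 : Nat) : Int) ≤ x) with h | h
    · rw [if_pos h]
      rw [if_pos (by push_cast at h ⊢; omega)] at ih
      have hv : vxF x t = x - t := by unfold vxF; rw [if_pos hx]; push_cast at h ⊢; omega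
      rw [hv]; push_cast at h ⊢; ring_nf; ring_nf at ih; omega
    · rw [if_neg h]
      rcases (by push_cast at h ⊢; omega : (t : Int) = x ∨ ¬ (t : Int) ≤ x) with he | hn
      · rw [if_pos (by omega)] at ih
        have hv : vxF x t = 0 := by unfold vxF; rw [if_pos hx]; omega
        rw [he] at ih
        rw [hv]
        linear_combination ih
      · rw [if_neg hn] at ih
        have hv : vxF x t = 0 := by unfold vxF; rw [if_pos hx]; omega
        rw [hv]; omega

lemma px_mono (x : Int) (hx : 0 ≤ x) (s t : Nat) (h : s ≤ t) : pxF x s ≤ pxF x t := by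
  induction t with
  | zero => simp_all
  | succ t ih =>
    rcases (by omega : s = t + 1 ∨ s ≤ t) with rfl | hle
    · exact le_rfl
    · have : pxF x t ≤ pxF x (t+1) := by
        simp only [pxF]
        have : 0 ≤ vxF x t := by unfold vxF; rw [if_pos hx]; omega
        omega
      exact le_trans (ih hle) this

lemma px_nonpos (x : Int) (hx : x ≤ 0) (t : Nat) : pxF x t ≤ 0 := by
  induction t with
  | zero => simp [pxF]
  | succ t ih =>
    simp only [pxF]
    have : vxF x t ≤ 0 := by unfold vxF; split_ifs <;> omega
    omega

lemma px_le_plateau (x : Int) (hx : 0 ≤ x) (t : Nat) : 2 * pxF x t ≤ x * x + x := by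
  rw [px_closed x hx t]
  split_ifs with h
  · nlinarith [sq_nonneg (x - t), Int.natCast_nonneg t]
  · omega

lemma py_nonneg_asc (y : Int) (t : Nat) (h : (t : Int) ≤ y) : 0 ≤ pyF y t := by
  have := py_closed y t
  nlinarith [Int.natCast_nonneg t]

lemma py_desc (y : Int) (s : Nat) (hs : y ≤ s) (k : Nat) : pyF y (s + k) ≤ pyF y s := by
  induction k with
  | zero => exact le_rfl
  | succ k ih =>
    have h1 : pyF y (s + (k+1)) = pyF y (s + k) + (y - (s + k : Nat)) := rfl
    rw [h1]
    have : (((s + k : Nat)) : Int) ≥ y := by push_cast; omega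
    omega

lemma py_persist (y : Int) (s t : Nat) (h : pyF y s < -101) (hst : s ≤ t) : pyF y t < -101 := by
  have hys : y ≤ s := by
    by_contra hc
    have := py_nonneg_asc y s (by omega)
    omega
  obtain ⟨k, rfl⟩ := Nat.exists_eq_add_of_le hst
  have := py_desc y s hys k
  omega

lemma my_zero (y : Int) (hy : y ≤ 0) (t : Nat) : myF y t = 0 := by
  have hpy : ∀ u : Nat, pyF y u ≤ 0 := by
    intro u
    induction u with
    | zero => simp [pyF]
    | succ u ih => simp only [pyF]; have : (u:Int) ≥ 0 := Int.natCast_nonneg u; omega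
  induction t with
  | zero => rfl
  | succ t ih =>
    simp only [myF, ih]
    rw [if_neg (by have := hpy (t+1); omega)]

lemma py_asc_mono (y : Int) (s t : Nat) (h : s ≤ t) (ht : (t : Int) ≤ y) : pyF y s ≤ pyF y t := by
  induction t with
  | zero => simp_all
  | succ t ih =>
    rcases (by omega : s = t + 1 ∨ s ≤ t) with rfl | hle
    · exact le_rfl
    · have hstep : pyF y t ≤ pyF y (t+1) := by
        show pyF y t ≤ pyF y t + (y - t)
        push_cast at ht
        omega
      exact le_trans (ih hle (by push_cast at ht ⊢; omega)) hstep

lemma py_le_peak (y : Int) (hy : 1 ≤ y) (t : Nat) : pyF y t ≤ pyF y y.toNat := by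
  rcases (by omega : t ≤ y.toNat ∨ y.toNat ≤ t) with h | h
  · exact py_asc_mono y t y.toNat h (by omega)
  · obtain ⟨k, rfl⟩ := Nat.exists_eq_add_of_le h
    exact py_desc y y.toNat (by omega) k

lemma my_eq (y : Int) (hy : 1 ≤ y) (t : Nat) :
    myF y t = if t ≤ y.toNat then pyF y t else pyF y y.toNat := by
  induction t with
  | zero => rw [if_pos (Nat.zero_le _)]; rfl
  | succ t ih =>
    rcases (by omega : t + 1 ≤ y.toNat ∨ t = y.toNat ∨ y.toNat < t) with h | h | h
    · rw [if_pos h]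
      rw [if_pos (by omega)] at ih
      simp only [myF, ih]
      rw [if_pos ?pos]
      case pos =>
        show pyF y t + (y - t) > pyF y t
        have h2 : (t : Int) < y := by
          have := Int.toNat_of_nonneg (show (0:Int) ≤ y by omega)
          omega
        omega
    · subst h
      rw [if_neg (by omega)]
      rw [if_pos (by omega)] at ih
      simp only [myF, ih]
      rw [if_neg ?neg]
      case neg =>
        show ¬ (pyF y y.toNat + (y - y.toNat) > pyF y y.toNat)
        have : (y.toNat : Int) = y := Int.toNat_of_nonneg (by omega)
        omega
    · rw [if_neg (by omega)]
      rw [if_neg (by omega)] at ih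
      simp only [myF, ih]
      rw [if_neg (by have := py_le_peak y hy (t+1); omega)]

lemma abs_lt_of_sq (b s : Int) (h0 : 0 ≤ s) (h : b * b < s * s) : -s < b ∧ b < s := by
  constructor <;> nlinarith

lemma W1 (y s1 : Int) (t : Nat) (h0 : 0 ≤ s1)
    (hub : (2*y+1)*(2*y+1) + 456 ≤ s1*s1) (hlb : (s1-1)*(s1-1) < (2*y+1)*(2*y+1) + 456) :
    pyF y t ≤ -57 ↔ (2*y+1) + s1 ≤ 2*(t:Int) := by
  have hpy := py_closed y t
  have ht0 : (0:Int) ≤ t := Int.natCast_nonneg t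
  set b := 2*y+1 with hb
  set w := 2*(t:Int) - b with hw
  have key : pyF y t ≤ -57 ↔ b*b + 456 ≤ w*w := by
    constructor <;> intro h <;> nlinarith
  rw [key]
  have hbs := abs_lt_of_sq b s1 h0 (by nlinarith)
  constructor
  · intro h
    by_contra hc
    push Not at hc
    have hw1 : w ≤ s1 - 1 := by omega
    have hw2 : -(s1-1) ≤ w := by omega
    nlinarith
  · intro h
    nlinarith

lemma W2 (y s2 : Int) (t : Nat) (h0 : 0 ≤ s2)
    (hlo : s2*s2 ≤ (2*y+1)*(2*y+1) + 808) (hhi : (2*y+1)*(2*y+1) + 808 < (s2+1)*(s2+1)) :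
    -101 ≤ pyF y t ↔ (-s2 ≤ 2*(t:Int) - (2*y+1) ∧ 2*(t:Int) - (2*y+1) ≤ s2) := by
  have hpy := py_closed y t
  set b := 2*y+1 with hb
  set w := 2*(t:Int) - b with hw
  have key : -101 ≤ pyF y t ↔ w*w ≤ b*b + 808 := by
    constructor <;> intro h <;> nlinarith
  rw [key]
  constructor
  · intro h
    constructor
    · by_contra hc; push Not at hc
      have : s2 + 1 ≤ -w := by omega
      nlinarith
    · by_contra hc; push Not at hc
      have : s2 + 1 ≤ w := by omega
      nlinarith
  · rintro ⟨h1, h2⟩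
    rcases (by omega : 0 ≤ w ∨ w < 0) with hws | hws <;> nlinarith

lemma W3 (x r : Int) (t : Nat) (hx : 23 ≤ x) (h0 : 0 ≤ r)
    (hlo : r*r ≤ (2*x+1)*(2*x+1) - 2056) (hhi : (2*x+1)*(2*x+1) - 2056 < (r+1)*(r+1)) :
    257 ≤ pxF x t ↔ (2*x+1) - 2*(t:Int) ≤ r := by
  have hpx := px_closed x (by omega) t
  have ht0 : (0:Int) ≤ t := Int.natCast_nonneg t
  set c := 2*x+1 with hc
  set w := c - 2*(t:Int) with hw
  rcases (by omega : (t:Int) ≤ x ∨ x < (t:Int)) with h | h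
  · rw [if_pos h] at hpx
    have key : 257 ≤ pxF x t ↔ w*w ≤ c*c - 2056 := by
      constructor <;> intro hk <;> nlinarith
    rw [key]
    have hwpos : 1 ≤ w := by omega
    constructor
    · intro hk
      by_contra hcon; push Not at hcon
      have : r + 1 ≤ w := by omega
      nlinarith
    · intro hk
      nlinarith
  · rw [if_neg (by omega)] at hpx
    constructor
    · intro _; omega
    · intro _; nlinarith

lemma W4 (x q : Int) (t : Nat) (hx : 24 ≤ x) (h0 : 0 ≤ q)
    (hub : (2*x+1)*(2*x+1) - 2288 ≤ q*q) (hlb : (q-1)*(q-1) < (2*x+1)*(2*x+1) - 2288) :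
    pxF x t ≤ 286 ↔ q ≤ (2*x+1) - 2*(t:Int) := by
  have hpx := px_closed x (by omega) t
  have ht0 : (0:Int) ≤ t := Int.natCast_nonneg t
  set c := 2*x+1 with hc
  set w := c - 2*(t:Int) with hw
  have hq1 : 1 ≤ q := by nlinarith
  rcases (by omega : (t:Int) ≤ x ∨ x < (t:Int)) with h | h
  · rw [if_pos h] at hpx
    have key : pxF x t ≤ 286 ↔ c*c - 2288 ≤ w*w := by
      constructor <;> intro hk <;> nlinarith
    rw [key]
    have hwpos : 1 ≤ w := by omega
    constructor
    · intro hk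
      by_contra hcon; push Not at hcon
      have hw1 : w ≤ q - 1 := by omega
      nlinarith
    · intro hk
      nlinarith
  · rw [if_neg (by omega)] at hpx
    constructor
    · intro hk; nlinarith
    · intro hk; omega

lemma inTarget_iff (px py : Int) :
    inTargetA px py = true ↔ (257 ≤ px ∧ px ≤ 286 ∧ -101 ≤ py ∧ py ≤ -57) := by
  simp [inTargetA, and_assoc]

lemma my_value (y : Int) (N : Nat) (hpy : pyF y N ≤ -57) :
    myF y N = (if y > 0 then PySem.Int.floordiv (y*(y+1)) 2 else 0) := by
  rcases (by omega : y ≤ 0 ∨ 1 ≤ y) with hy | hy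
  · rw [my_zero y hy, if_neg (by omega)]
  · rw [if_pos (by omega)]
    have hNgt : ¬ (N ≤ y.toNat) := by
      intro hc
      have := py_nonneg_asc y N (by omega)
      omega
    rw [my_eq y hy N, if_neg hNgt]
    have hpk := py_closed y y.toNat
    have hyt : (y.toNat : Int) = y := Int.toNat_of_nonneg (by omega)
    rw [hyt] at hpk
    rw [PySem.Int.floordiv_eq_ediv_of_pos (by norm_num : (0:Int) < 2)]
    have hprod : y * (y + 1) = 2 * pyF y y.toNat := by ring_nf; ring_nf at hpk; omega
    omega

lemma alt_eq (x y : Int) :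
    hits_alt x y = (if inTargetA (pxF x (Nexit x y)) (pyF y (Nexit x y)) then (true, myF y (Nexit x y)) else (false, 0)) := by
  have hexit : exitF x y (Nexit x y) = true := Nat.find_spec (exit_exists x y)
  set N := Nexit x y with hN
  by_cases hx : x < 23
  · have hfalse : inTargetA (pxF x N) (pyF y N) = false := by
      rcases (by omega : x ≤ 0 ∨ 1 ≤ x) with hxs | hxs
      · have := px_nonpos x hxs N
        simp only [inTargetA]
        simp only [Bool.and_eq_false_iff, decide_eq_false_iff_not]
        left; left; left; omega
      · have h1 := px_le_plateau x (by omega) N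
        have h2 : x * x + x ≤ 506 := by nlinarith
        simp only [inTargetA]
        simp only [Bool.and_eq_false_iff, decide_eq_false_iff_not]
        left; left; left; omega
    unfold hits_alt
    rw [if_pos hx, hfalse]
    simp
  · push Not at hx
    -- square-root facts
    have hd1 : (1:Int) ≤ (2*y+1)*(2*y+1) + 456 := by nlinarith [sq_nonneg (2*y+1)]
    have hd2 : (0:Int) ≤ (2*y+1)*(2*y+1) + 808 := by nlinarith [sq_nonneg (2*y+1)]
    have he1 : (0:Int) ≤ (2*x+1)*(2*x+1) - 2056 := by nlinarith
    obtain ⟨hs1a, hs1b, hs1c⟩ := isqrtCeilB_spec ((2*y+1)*(2*y+1) + 456) hd1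
    obtain ⟨hs2a, hs2b, hs2c⟩ := isqrtB_spec ((2*y+1)*(2*y+1) + 808) hd2
    obtain ⟨hra, hrb, hrc⟩ := isqrtB_spec ((2*x+1)*(2*x+1) - 2056) he1
    set s1 := isqrtCeilB ((2*y+1)*(2*y+1) + 456) with hs1def
    set s2 := isqrtB ((2*y+1)*(2*y+1) + 808) with hs2def
    set r := isqrtB ((2*x+1)*(2*x+1) - 2056) with hrdef
    have hs1abs : -s1 < 2*y+1 ∧ 2*y+1 < s1 := abs_lt_of_sq (2*y+1) s1 hs1a (by nlinarith)
    have hrabs : r < 2*x+1 := by nlinarith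
    have efd : ∀ a : Int, PySem.Int.floordiv a 2 = a / 2 := fun a =>
      PySem.Int.floordiv_eq_ediv_of_pos (by norm_num)
    unfold hits_alt
    rw [if_neg (by omega)]
    dsimp only
    rw [← hs1def, ← hs2def, ← hrdef]
    set t1 := PySem.Int.floordiv (2*y+1 + s1 + 1) 2 with ht1def
    set t2 := PySem.Int.floordiv (2*y+1 + s2) 2 with ht2def
    set u1 := PySem.Int.floordiv (2*x+1 - r + 1) 2 with hu1def
    rw [efd] at ht1def ht2def hu1def
    have ht1 : 2*y+1 + s1 ≤ 2*t1 ∧ 2*t1 ≤ 2*y+1 + s1 + 1 := by omega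
    have ht2 : 2*t2 ≤ 2*y+1 + s2 ∧ 2*y+1 + s2 ≤ 2*t2 + 1 := by omega
    have hu1 : 2*x+1 - r ≤ 2*u1 ∧ 2*u1 ≤ 2*x+1 - r + 1 := by omega
    -- the height value
    have hval : ∀ M : Nat, pyF y M ≤ -57 →
        (true, if y > 0 then PySem.Int.floordiv (y*(y+1)) 2 else 0) = ((true, myF y M) : Bool × Int) := by
      intro M hM
      rw [my_value y M hM]
    by_cases hx23 : x = 23
    · rw [if_pos hx23]
      have hiff : (max t1 u1 ≤ t2) ↔ inTargetA (pxF x N) (pyF y N) = true := by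
        constructor
        · intro hle
          set t0 := (max t1 u1).toNat with ht0def
          have ht0 : (t0 : Int) = max t1 u1 := by
            have : 1 ≤ t1 := by omega
            omega
          have p1 : pyF y t0 ≤ -57 := (W1 y s1 t0 hs1a hs1b hs1c).mpr (by omega)
          have p2 : -101 ≤ pyF y t0 := (W2 y s2 t0 hs2a hs2b hs2c).mpr (by constructor <;> omega)
          have p3 : 257 ≤ pxF x t0 := (W3 x r t0 hx hra hrb hrc).mpr (by omega)
          have p4 : pxF x t0 ≤ 286 := by
            have := px_le_plateau x (by omega) t0
            subst hx23; omega
          have hexit0 : exitF x y t0 = true := by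
            simp only [exitF, Bool.or_eq_true]
            left
            rw [inTarget_iff]
            exact ⟨p3, p4, p2, p1⟩
          have hNle : N ≤ t0 := by rw [hN]; exact Nat.find_min' (exit_exists x y) hexit0
          simp only [exitF, Bool.or_eq_true] at hexit
          rcases hexit with h | h
          · exact h
          · exfalso
            simp only [missedA, Bool.or_eq_true, decide_eq_true_eq] at h
            rcases h with h | h
            · have := py_persist y N t0 h hNle
              omega
            · have := px_mono x (by omega) N t0 hNle
              omega
        · intro hin
          rw [inTarget_iff] at hin
          obtain ⟨hA, hB, hC, hD⟩ := hin
          have w1 := (W1 y s1 N hs1a hs1b hs1c).mp hD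
          have w2 := (W2 y s2 N hs2a hs2b hs2c).mp hC
          have w3 := (W3 x r N hx hra hrb hrc).mp hA
          omega
      by_cases hle : max t1 u1 ≤ t2
      · rw [if_pos hle]
        have hT := hiff.mp hle
        rw [hT]
        rw [inTarget_iff] at hT
        exact hval N hT.2.2.2
      · rw [if_neg hle]
        have hT : inTargetA (pxF x N) (pyF y N) = false := by
          cases h : inTargetA (pxF x N) (pyF y N)
          · rfl
          · exact absurd (hiff.mpr h) hle
        rw [hT]
        simp
    · rw [if_neg hx23]
      have hx24 : 24 ≤ x := by omega
      have he2 : (1:Int) ≤ (2*x+1)*(2*x+1) - 2288 := by nlinarith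
      obtain ⟨hqa, hqb, hqc⟩ := isqrtCeilB_spec ((2*x+1)*(2*x+1) - 2288) he2
      set q := isqrtCeilB ((2*x+1)*(2*x+1) - 2288) with hqdef
      set u2 := PySem.Int.floordiv (2*x+1 - q) 2 with hu2def
      rw [efd] at hu2def
      have hqlt : q ≤ 2*x+1 := by
        have := abs_lt_of_sq (q-1) (2*x+1) (by omega) (by nlinarith [hqc])
        omega
      have hu2 : 2*u2 ≤ 2*x+1 - q ∧ 2*x+1 - q ≤ 2*u2 + 1 := by omega
      have hiff : (max t1 u1 ≤ min t2 u2) ↔ inTargetA (pxF x N) (pyF y N) = true := by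
        constructor
        · intro hle
          set t0 := (max t1 u1).toNat with ht0def
          have ht0 : (t0 : Int) = max t1 u1 := by
            have : 1 ≤ t1 := by omega
            omega
          have p1 : pyF y t0 ≤ -57 := (W1 y s1 t0 hs1a hs1b hs1c).mpr (by omega)
          have p2 : -101 ≤ pyF y t0 := (W2 y s2 t0 hs2a hs2b hs2c).mpr (by constructor <;> omega)
          have p3 : 257 ≤ pxF x t0 := (W3 x r t0 hx hra hrb hrc).mpr (by omega)
          have p4 : pxF x t0 ≤ 286 := (W4 x q t0 hx24 hqa hqb hqc).mpr (by omega)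
          have hexit0 : exitF x y t0 = true := by
            simp only [exitF, Bool.or_eq_true]
            left
            rw [inTarget_iff]
            exact ⟨p3, p4, p2, p1⟩
          have hNle : N ≤ t0 := by rw [hN]; exact Nat.find_min' (exit_exists x y) hexit0
          simp only [exitF, Bool.or_eq_true] at hexit
          rcases hexit with h | h
          · exact h
          · exfalso
            simp only [missedA, Bool.or_eq_true, decide_eq_true_eq] at h
            rcases h with h | h
            · have := py_persist y N t0 h hNle
              omega
            · have := px_mono x (by omega) N t0 hNle
              omega
        · intro hin
          rw [inTarget_iff] at hin
          obtain ⟨hA, hB, hC, hD⟩ := hin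
          have w1 := (W1 y s1 N hs1a hs1b hs1c).mp hD
          have w2 := (W2 y s2 N hs2a hs2b hs2c).mp hC
          have w3 := (W3 x r N hx hra hrb hrc).mp hA
          have w4 := (W4 x q N hx24 hqa hqb hqc).mp hB
          omega
      by_cases hle : max t1 u1 ≤ min t2 u2
      · rw [if_pos hle]
        have hT := hiff.mp hle
        rw [hT]
        rw [inTarget_iff] at hT
        exact hval N hT.2.2.2
      · rw [if_neg hle]
        have hT : inTargetA (pxF x N) (pyF y N) = false := by
          cases h : inTargetA (pxF x N) (pyF y N)
          · rfl
          · exact absurd (hiff.mpr h) hle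
        rw [hT]
        simp

-- ===== VERDICT (by name: the statement is the Claim_ definition above) =====
theorem hits_spec : Claim_equal_hits := by
  intro x y _
  unfold Spec_hits
  rw [hits_eq, alt_eq]
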